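-- pv_equiv track=rewrite | github.com/eggyy1224/glitch_home | backend/playback_scripts/set_uniform_grid_25x25_layout.py | resolve_images
-- ===== SOURCE A (Python) =====
-- from itertools import cycle
-- from typing import Sequence
--
-- BASE_IMAGES = [
--     "offspring_20251006_202714_956.png",
--     "offspring_20251008_191824_966.png",
--     "offspring_20250924_191135_325.png",
--     "offspring_20251006_192152_401.png",
--     "offspring_20250925_141803_803.png",
--     "offspring_20251006_191644_532.png",
--     "offspring_20251008_193042_321.png",
--     "offspring_20251012_183757_386.png",
--     "offspring_20250924_145030_681.png",
--     "offspring_20250927_144919_645.png",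
--     "offspring_20251005_144934_368.png",
--     "offspring_20251004_224929_107.png",
--     "offspring_20251012_181715_584.png",
--     "offspring_20251005_143953_981.png",
--     "offspring_20251001_193728_640.png",
--     "offspring_20251004_221320_255.png",
-- ]
--
-- def resolve_images(overrides: Sequence[str] | None, count: int) -> list[str]:
--     pool = list(overrides) if overrides else BASE_IMAGES
--     if not pool:
--         raise ValueError("No images available to populate the grid")
--     repeated = []
--     it = cycle(pool)
--     for _ in range(count):
--         repeated.append(next(it))
--     return repeated
-- ===== SOURCE B (Python) =====
-- BASE_IMAGES = [
--     "offspring_20251006_202714_956.png",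
--     "offspring_20251008_191824_966.png",
--     "offspring_20250924_191135_325.png",
--     "offspring_20251006_192152_401.png",
--     "offspring_20250925_141803_803.png",
--     "offspring_20251006_191644_532.png",
--     "offspring_20251008_193042_321.png",
--     "offspring_20251012_183757_386.png",
--     "offspring_20250924_145030_681.png",
--     "offspring_20250927_144919_645.png",
--     "offspring_20251005_144934_368.png",
--     "offspring_20251004_224929_107.png",
--     "offspring_20251012_181715_584.png",
--     "offspring_20251005_143953_981.png",
--     "offspring_20251001_193728_640.png",
--     "offspring_20251004_221320_255.png",
-- ]
--
-- def resolve_images(overrides, count):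
--     pool = list(overrides) if overrides else BASE_IMAGES
--     if count <= 0:
--         return []
--     reps = count // len(pool) + 1
--     return (pool * reps)[:count]
-- ===== Notes on version B (the rewrite author's own statement) =====
-- stated objective: simpler
-- what changed: Replaces the count-step loop over itertools.cycle with whole-list replication: reps = count//len(pool)+1, then pool*reps sliced to count (with an explicit [] for count <= 0).
import Mathlib
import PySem

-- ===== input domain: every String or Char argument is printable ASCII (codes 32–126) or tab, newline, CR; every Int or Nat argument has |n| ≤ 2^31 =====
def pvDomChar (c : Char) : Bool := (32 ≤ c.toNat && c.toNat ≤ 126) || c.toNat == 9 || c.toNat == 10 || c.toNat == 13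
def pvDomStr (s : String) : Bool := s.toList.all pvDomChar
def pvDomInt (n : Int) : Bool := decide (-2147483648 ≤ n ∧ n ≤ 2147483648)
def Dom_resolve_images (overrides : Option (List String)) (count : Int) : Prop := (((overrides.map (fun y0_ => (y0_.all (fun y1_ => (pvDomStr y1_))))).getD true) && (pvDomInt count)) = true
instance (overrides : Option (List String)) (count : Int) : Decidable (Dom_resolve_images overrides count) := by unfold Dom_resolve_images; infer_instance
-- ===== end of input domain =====

-- B replaces the count-step loop over itertools.cycle by whole-list replication (pool * reps) sliced to count; return value only.

-- ===== PORT A =====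
def BASE_IMAGES : List String := [
    "offspring_20251006_202714_956.png",
    "offspring_20251008_191824_966.png",
    "offspring_20250924_191135_325.png",
    "offspring_20251006_192152_401.png",
    "offspring_20250925_141803_803.png",
    "offspring_20251006_191644_532.png",
    "offspring_20251008_193042_321.png",
    "offspring_20251012_183757_386.png",
    "offspring_20250924_145030_681.png",
    "offspring_20250927_144919_645.png",
    "offspring_20251005_144934_368.png",
    "offspring_20251004_224929_107.png",
    "offspring_20251012_181715_584.png",
    "offspring_20251005_143953_981.png",
    "offspring_20251001_193728_640.png",
    "offspring_20251004_221320_255.png"]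

-- pool selection shared by both Pythons: `list(overrides) if overrides else BASE_IMAGES`
-- (Python truthiness: None and [] both fall back to BASE_IMAGES)
def poolOf (overrides : Option (List String)) : List String :=
  match overrides with
  | some l => if l.isEmpty then BASE_IMAGES else l
  | none => BASE_IMAGES

-- `for _ in range(count): repeated.append(next(it))` — next(cycle(pool)) at step idx is pool[idx % len(pool)]
def cycleLoop (pool : List String) : Nat → Nat → List String
  | 0, _ => []
  | k+1, idx => pool.getD (idx % pool.length) "" :: cycleLoop pool k (idx+1)

-- A's `raise ValueError` on an empty pool is unreachable (BASE_IMAGES is nonempty and empty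
-- overrides fall back to it), so A is total and no Pre_ is needed.
def resolve_images (overrides : Option (List String)) (count : Int) : List String :=
  let pool := poolOf overrides
  cycleLoop pool count.toNat 0

-- ===== PORT B =====
def resolve_images_alt (overrides : Option (List String)) (count : Int) : List String :=
  let pool := poolOf overrides
  if count ≤ 0 then []
  else
    let reps := PySem.Int.floordiv count (pool.length : Int) + 1
    ((List.replicate reps.toNat pool).flatten).take count.toNat

-- ===== PRECONDITION & SPEC =====
def Spec_resolve_images (overrides : Option (List String)) (count : Int) (out : List String) : Prop := out = resolve_images_alt overrides count
instance (overrides : Option (List String)) (count : Int) (out : List String) : Decidable (Spec_resolve_images overrides count out) := by unfold Spec_resolve_images; infer_instance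

-- ===== CLAIM (what is proved, stated in full; the proofs are below) =====
def Claim_equal_resolve_images : Prop := ∀ (overrides : Option (List String)) (count : Int), Dom_resolve_images overrides count → Spec_resolve_images overrides count (resolve_images overrides count)

-- ===== LEMMAS AND PROOFS =====
lemma poolOf_ne_nil (overrides : Option (List String)) : poolOf overrides ≠ [] := by
  unfold poolOf
  cases overrides with
  | none => decide
  | some l =>
    by_cases h : l.isEmpty
    · simp [h]; decide
    · simp [h]; exact fun hn => h (by simp [hn])

lemma cycleLoop_eq_map (pool : List String) :
    ∀ (k idx : Nat), cycleLoop pool k idx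
      = (List.range k).map (fun i => pool.getD ((idx + i) % pool.length) "") := by
  intro k
  induction k with
  | zero => intro idx; simp [cycleLoop]
  | succ m ih =>
    intro idx
    rw [cycleLoop, List.range_succ_eq_map, List.map_cons, List.map_map, ih (idx + 1)]
    simp [Function.comp, Nat.add_assoc, Nat.add_comm 1]

lemma take_flatten_replicate (pool : List String) (hne : pool ≠ []) :
    ∀ (r c : Nat), c ≤ r * pool.length →
      ((List.replicate r pool).flatten).take c
        = (List.range c).map (fun i => pool.getD (i % pool.length) "") := by
  intro r
  induction r with
  | zero =>
    intro c hc
    simp at hc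
    simp [hc]
  | succ m ih =>
    intro c hc
    have hn : 0 < pool.length := List.length_pos_of_ne_nil hne
    rw [List.replicate_succ, List.flatten_cons]
    by_cases h : c ≤ pool.length
    · rw [List.take_append_of_le_length (by simpa using h)]
      apply List.ext_getElem
      · simp [Nat.min_eq_left h]
      · intro i h1 h2
        have hi : i < pool.length := lt_of_lt_of_le (by simpa [Nat.min_eq_left h] using h1) h
        simp [Nat.mod_eq_of_lt hi, List.getD, List.getElem?_eq_getElem hi]
    · push Not at h
      rw [List.take_append, List.take_of_length_le (le_of_lt h)]
      have hsub : c - pool.length ≤ m * pool.length := by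
        have hmul : (m + 1) * pool.length = m * pool.length + pool.length := by ring
        omega
      rw [ih (c - pool.length) hsub]
      -- split range c at pool.length
      have hsplit : List.range c = List.range pool.length ++ (List.range (c - pool.length)).map (fun i => pool.length + i) := by
        have := @List.range_add pool.length (c - pool.length)
        rw [Nat.add_sub_cancel' (le_of_lt h)] at this
        simpa using this
      rw [hsplit, List.map_append, List.map_map]
      congr 1
      · apply List.ext_getElem
        · simp
        · intro i h1 h2
          have hi : i < pool.length := by simpa using h1
          simp [Nat.mod_eq_of_lt hi, List.getD, List.getElem?_eq_getElem hi]
      · apply List.map_congr_left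
        intro i _
        simp [Function.comp, Nat.add_mod_left]

-- ===== VERDICT (by name: the statement is the Claim_ definition above) =====
theorem resolve_images_spec : Claim_equal_resolve_images := by
  intro overrides count _
  unfold Spec_resolve_images resolve_images resolve_images_alt
  set pool := poolOf overrides with hp
  have hne : pool ≠ [] := poolOf_ne_nil overrides
  have hn : 0 < pool.length := List.length_pos_of_ne_nil hne
  by_cases hc : count ≤ 0
  · have : count.toNat = 0 := by omega
    simp [this, hc, cycleLoop]
  · push Not at hc
    simp only [if_neg (not_le.mpr hc)]
    -- bound: count ≤ reps * len
    have hdm := PySem.Int.floordiv_mul_add_mod count (pool.length : Int)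
    have hm0 : 0 ≤ PySem.Int.mod count (pool.length : Int) :=
      PySem.Int.mod_nonneg _ (by exact_mod_cast hn)
    have hm1 : PySem.Int.mod count (pool.length : Int) < (pool.length : Int) :=
      PySem.Int.mod_lt _ (by exact_mod_cast hn)
    set q := PySem.Int.floordiv count (pool.length : Int) with hq
    have hq0 : 0 ≤ q := by
      by_contra hql
      push Not at hql
      have : q * (pool.length : Int) ≤ -1 * (pool.length : Int) := by
        apply mul_le_mul_of_nonneg_right (by omega) (by exact_mod_cast Nat.zero_le _)
      omega
    have hbound : count.toNat ≤ (q + 1).toNat * pool.length := by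
      have h1 : count < (q + 1) * (pool.length : Int) := by
        have : (q + 1) * (pool.length : Int) = q * (pool.length : Int) + (pool.length : Int) := by ring
        omega
      have h2 : ((q + 1).toNat : Int) = q + 1 := Int.toNat_of_nonneg (by omega)
      have : (count.toNat : Int) ≤ ((q + 1).toNat * pool.length : Nat) := by
        push_cast [h2]
        omega
      exact_mod_cast this
    rw [cycleLoop_eq_map, take_flatten_replicate pool hne _ _ hbound]
    simp
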